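-- pv_equiv track=rewrite | github.com/Cuddles-Yu/ntub-coding | 專案檔案/地圖資訊爬蟲/ckip/module/functions.py | combine_by_pos
-- ===== SOURCE A (Python) =====
-- def combine_by_pos(word_list, pos_list, pos):
--     combined_words = []
--     combined_pos = []
--     i = 0
--     while i < len(word_list):
--         if pos_list[i] == pos:
--             temp_word = word_list[i]
--             j = i + 1
--             while j < len(word_list) and pos_list[j] == pos:
--                 temp_word += word_list[j]
--                 j += 1
--             combined_words.append(temp_word)
--             combined_pos.append(pos)
--             i = j
--         else:
--             combined_words.append(word_list[i])
--             combined_pos.append(pos_list[i])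
--             i += 1
--     return combined_words, combined_pos
-- ===== SOURCE B (Python) =====
-- def combine_by_pos(word_list, pos_list, pos):
--     words, tags = [], []
--     for w, p in zip(word_list, pos_list):
--         if p == pos and tags and tags[-1] == pos:
--             words[-1] += w
--         else:
--             words.append(w)
--             tags.append(p)
--     return words, tags
-- ===== Notes on version B (the rewrite author's own statement) =====
-- stated objective: simpler
-- what changed: Replaced the nested while loops with explicit indices i/j by a single flat pass over zip(word_list, pos_list) that merges a word into the last emitted entry when the last emitted tag equals the target tag, carrying the run state implicitly.
import Mathlib
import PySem

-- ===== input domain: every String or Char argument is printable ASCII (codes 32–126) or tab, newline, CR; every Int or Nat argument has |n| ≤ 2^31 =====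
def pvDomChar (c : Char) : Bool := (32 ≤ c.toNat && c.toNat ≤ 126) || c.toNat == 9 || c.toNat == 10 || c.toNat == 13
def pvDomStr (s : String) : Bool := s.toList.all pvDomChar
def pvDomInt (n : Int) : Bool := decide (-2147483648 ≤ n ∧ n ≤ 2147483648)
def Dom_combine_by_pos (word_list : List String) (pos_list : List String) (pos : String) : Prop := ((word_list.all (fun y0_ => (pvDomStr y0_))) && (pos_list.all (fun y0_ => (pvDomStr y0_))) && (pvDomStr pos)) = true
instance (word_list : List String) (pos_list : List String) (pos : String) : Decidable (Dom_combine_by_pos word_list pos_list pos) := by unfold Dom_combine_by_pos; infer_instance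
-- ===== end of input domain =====

-- B replaces A's nested while loops (indices i, j) by one flat pass over zip(word_list, pos_list)
-- that merges into the last emitted entry; objective: simpler.

-- ===== PORT A =====
-- inner 'while j < len(word_list) and pos_list[j] == pos' loop: returns (temp_word, j).
-- The fuel argument is only a structural totality guard (word_list.length fuel always suffices);
-- indexing is in range under Pre_, so xs[j]?.getD "" is exactly Python's xs[j] there.
def pvAInner (wl pl : List String) (pos : String) : Nat → String → Nat → String × Nat
  | 0, temp, j => (temp, j)
  | fuel + 1, temp, j =>
    if j < wl.length then
      if (pl[j]?.getD "") == pos then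
        pvAInner wl pl pos fuel (temp ++ (wl[j]?.getD "")) (j + 1)
      else (temp, j)
    else (temp, j)

-- outer 'while i < len(word_list)' loop with accumulators combined_words / combined_pos
-- (fuel is again only a totality guard: i advances by at least 1 per iteration)
def pvAOuter (wl pl : List String) (pos : String) : Nat → Nat → List String → List String → List String × List String
  | 0, _, cw, cp => (cw, cp)
  | fuel + 1, i, cw, cp =>
    if i < wl.length then
      if (pl[i]?.getD "") == pos then
        pvAOuter wl pl pos fuel (pvAInner wl pl pos wl.length (wl[i]?.getD "") (i + 1)).2
          (cw ++ [(pvAInner wl pl pos wl.length (wl[i]?.getD "") (i + 1)).1]) (cp ++ [pos])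
      else
        pvAOuter wl pl pos fuel (i + 1) (cw ++ [wl[i]?.getD ""]) (cp ++ [pl[i]?.getD ""])
    else (cw, cp)

def combine_by_pos (word_list : List String) (pos_list : List String) (pos : String) :
    List String × List String :=
  pvAOuter word_list pos_list pos word_list.length 0 [] []

-- ===== PORT B =====
-- one step of B's flat loop over zip(word_list, pos_list)
def pvBStep (pos : String) (acc : List String × List String) (wp : String × String) :
    List String × List String :=
  if wp.2 == pos && !acc.2.isEmpty && acc.2.getLastD "" == pos then
    (acc.1.dropLast ++ [acc.1.getLastD "" ++ wp.1], acc.2)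
  else (acc.1 ++ [wp.1], acc.2 ++ [wp.2])

def combine_by_pos_alt (word_list : List String) (pos_list : List String) (pos : String) :
    List String × List String :=
  (word_list.zip pos_list).foldl (pvBStep pos) ([], [])

-- ===== PRECONDITION & SPEC =====
-- A raises IndexError (pos_list[i]) whenever pos_list is shorter than word_list; exactly those inputs are excluded.
def Pre_combine_by_pos (word_list : List String) (pos_list : List String) (pos : String) : Prop :=
  word_list.length ≤ pos_list.length
instance (word_list : List String) (pos_list : List String) (pos : String) : Decidable (Pre_combine_by_pos word_list pos_list pos) := by unfold Pre_combine_by_pos; infer_instance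

def pvWitness_combine_by_pos : List String × List String × String :=
  (["a", "b", "c"], ["N", "N", "V"], "N")

def Spec_combine_by_pos (word_list : List String) (pos_list : List String) (pos : String) (out : List String × List String) : Prop := out = combine_by_pos_alt word_list pos_list pos
instance (word_list : List String) (pos_list : List String) (pos : String) (out : List String × List String) : Decidable (Spec_combine_by_pos word_list pos_list pos out) := by unfold Spec_combine_by_pos; infer_instance

-- ===== CLAIM (what is proved, stated in full; the proofs are below) =====
def Claim_equal_combine_by_pos : Prop := ∀ (word_list : List String) (pos_list : List String) (pos : String), Dom_combine_by_pos word_list pos_list pos → Pre_combine_by_pos word_list pos_list pos → Spec_combine_by_pos word_list pos_list pos (combine_by_pos word_list pos_list pos)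

-- ===== LEMMAS AND PROOFS =====

-- the inner loop never moves its index backwards
theorem pvAInner_ge (wl pl : List String) (pos : String) (fuel : Nat) (temp : String) (j : Nat) :
    j ≤ (pvAInner wl pl pos fuel temp j).2 := by
  induction fuel generalizing temp j with
  | zero => simp [pvAInner]
  | succ fuel ih =>
    simp only [pvAInner]
    split_ifs with h1 h2
    · exact le_trans (by omega) (ih (temp ++ (wl[j]?.getD "")) (j + 1))
    · simp
    · simp

-- with enough fuel, the index where pvAInner stops carries a non-matching tag (or is past the end)
theorem pvAInner_stop (wl pl : List String) (pos : String) (fuel : Nat) (temp : String) (j : Nat)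
    (hf : wl.length - j ≤ fuel) :
    (pvAInner wl pl pos fuel temp j).2 < wl.length →
    ¬ ((pl[(pvAInner wl pl pos fuel temp j).2]?.getD "") = pos) := by
  induction fuel generalizing temp j with
  | zero => intro h; simp [pvAInner] at h ⊢; omega
  | succ fuel ih =>
    simp only [pvAInner]
    split_ifs with h1 h2
    · exact ih (temp ++ (wl[j]?.getD "")) (j + 1) (by omega)
    · intro _ hc; simp_all
    · intro h; omega

-- B's fold absorbs a whole matching run exactly like A's inner while loop
theorem pvRun (wl pl : List String) (pos : String) (hpre : wl.length ≤ pl.length)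
    (fuel : Nat) :
    ∀ (j : Nat) (temp : String) (cw cp : List String), wl.length - j ≤ fuel →
    ((wl.zip pl).drop j).foldl (pvBStep pos) (cw ++ [temp], cp ++ [pos]) =
      ((wl.zip pl).drop (pvAInner wl pl pos fuel temp j).2).foldl (pvBStep pos)
        (cw ++ [(pvAInner wl pl pos fuel temp j).1], cp ++ [pos]) := by
  induction fuel with
  | zero =>
    intro j temp cw cp hf
    simp [pvAInner]
  | succ fuel ih =>
    intro j temp cw cp hf
    simp only [pvAInner]
    split_ifs with h1 h2
    · have hz : j < (wl.zip pl).length := by rw [List.length_zip]; omega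
      have hjp : j < pl.length := by omega
      have hpl : pl[j] = pos := by simpa [List.getElem?_eq_getElem hjp] using h2
      rw [List.drop_eq_getElem_cons hz]
      simp only [List.foldl_cons, List.getElem_zip]
      have hstep : pvBStep pos (cw ++ [temp], cp ++ [pos]) (wl[j], pl[j]) =
          (cw ++ [temp ++ wl[j]], cp ++ [pos]) := by
        simp [pvBStep, hpl]
      rw [hstep]
      simpa [List.getElem?_eq_getElem h1] using ih (j + 1) (temp ++ wl[j]) cw cp (by omega)
    · rfl
    · rfl

-- main invariant: A's outer loop from state (i, cw, cp) equals B's fold over the zip suffix,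
-- provided B's merge cannot fire at position i (cp does not end in pos when pl[i] = pos)
theorem pvMain (wl pl : List String) (pos : String) (hpre : wl.length ≤ pl.length) :
    ∀ (fuel i : Nat) (cw cp : List String), wl.length - i ≤ fuel →
      (i < wl.length → (pl[i]?.getD "") = pos → cp.getLast? ≠ some pos) →
      pvAOuter wl pl pos fuel i cw cp =
        ((wl.zip pl).drop i).foldl (pvBStep pos) (cw, cp) := by
  intro fuel
  induction fuel with
  | zero =>
    intro i cw cp hf _
    have : (wl.zip pl).drop i = [] := by
      apply List.drop_eq_nil_of_le; rw [List.length_zip]; omega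
    rw [this]; rfl
  | succ fuel ih =>
    intro i cw cp hf hguard
    by_cases hi : i < wl.length
    · have hz : i < (wl.zip pl).length := by rw [List.length_zip]; omega
      have hip : i < pl.length := by omega
      rw [List.drop_eq_getElem_cons hz]
      simp only [List.foldl_cons, List.getElem_zip]
      by_cases hp : (pl[i]?.getD "") = pos
      · -- run branch
        have hpl : pl[i] = pos := by simpa [List.getElem?_eq_getElem hip] using hp
        have hlast := hguard hi hp
        have hwi : wl[i]?.getD "" = wl[i] := by simp [List.getElem?_eq_getElem hi]
        have hstep : pvBStep pos (cw, cp) (wl[i], pl[i]) =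
            (cw ++ [wl[i]], cp ++ [pos]) := by
          cases cp with
          | nil => simp [pvBStep, hpl]
          | cons a t =>
            have hx : ((a :: t).getLast?.getD "") ≠ pos := by
              cases hq : (a :: t).getLast? with
              | none => simp at hq
              | some x =>
                simp only [Option.getD_some]
                intro hh
                exact hlast (by rw [hq, hh])
            simp [pvBStep, hpl, List.getLastD_eq_getLast?, hx]
        rw [hstep]
        simp only [pvAOuter, if_pos hi, if_pos (show ((pl[i]?.getD "") == pos) = true by simpa using hp), hwi]
        rw [pvRun wl pl pos hpre wl.length (i + 1) wl[i] cw cp (by omega)]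
        have hge := pvAInner_ge wl pl pos wl.length wl[i] (i + 1)
        apply ih _ _ _ (by omega)
        intro hr2 hp2
        exact absurd hp2 (pvAInner_stop wl pl pos wl.length wl[i] (i + 1) (by omega) hr2)
      · -- non-matching branch
        have hpl : ¬ (pl[i] = pos) := by simpa [List.getElem?_eq_getElem hip] using hp
        have hstep : pvBStep pos (cw, cp) (wl[i], pl[i]) =
            (cw ++ [wl[i]], cp ++ [pl[i]]) := by
          simp [pvBStep, hpl]
        rw [hstep]
        simp only [pvAOuter, if_pos hi, if_neg (show ¬ ((pl[i]?.getD "") == pos) = true by simpa using hp)]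
        have hwi : wl[i]?.getD "" = wl[i] := by simp [List.getElem?_eq_getElem hi]
        have hpi : pl[i]?.getD "" = pl[i] := by simp [List.getElem?_eq_getElem hip]
        rw [hwi, hpi]
        apply ih (i + 1) (cw ++ [wl[i]]) (cp ++ [pl[i]]) (by omega)
        intro _ _
        simp [List.getLast?_append, hpl]
    · have : (wl.zip pl).drop i = [] := by
        apply List.drop_eq_nil_of_le; rw [List.length_zip]; omega
      rw [this]
      simp [pvAOuter, hi]
-- ===== VERDICT (by name: the statement is the Claim_ definition above) =====
theorem combine_by_pos_spec : Claim_equal_combine_by_pos := by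
  intro wl pl pos _ hpre
  unfold Spec_combine_by_pos combine_by_pos combine_by_pos_alt
  simpa using pvMain wl pl pos hpre wl.length 0 [] [] (by omega) (by simp)
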